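-- pv_equiv track=rewrite | github.com/SystemJargon/filters | adlist_convert.py | cleanAdstr
-- ===== SOURCE A (Python) =====
-- def cleanAdstr(string):
-- 	'''	Get domain from string.
-- 		- excludes: wildcards, incomplete domains
-- 	'''
-- 	for n in range(0, len(string)):
-- 		if string[n] == ("*" or ".js" or "/"):
-- 			break
-- 		if string[n] == "^":
-- 			return string[:n]
-- 		if string[n] == "$":
-- 			break
-- ===== SOURCE B (Python) =====
-- def cleanAdstr(string):
--     '''Get domain from string: prefix before '^', unless '*' or '$' comes first.'''
--     caret = string.find('^')
--     if caret == -1: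
--         return None
--     star = string.find('*')
--     dollar = string.find('$')
--     big = len(string) + 1
--     if star == -1:
--         star = big
--     if dollar == -1:
--         dollar = big
--     if caret < star and caret < dollar:
--         return string[:caret]
--     return None
-- ===== Notes on version B (the rewrite author's own statement) =====
-- stated objective: simpler
-- what changed: Replaces the manual per-index scan with branching by three str.find calls and a sentinel comparison: return the prefix before the caret only if the caret occurs before any star or dollar.
import Mathlib
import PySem

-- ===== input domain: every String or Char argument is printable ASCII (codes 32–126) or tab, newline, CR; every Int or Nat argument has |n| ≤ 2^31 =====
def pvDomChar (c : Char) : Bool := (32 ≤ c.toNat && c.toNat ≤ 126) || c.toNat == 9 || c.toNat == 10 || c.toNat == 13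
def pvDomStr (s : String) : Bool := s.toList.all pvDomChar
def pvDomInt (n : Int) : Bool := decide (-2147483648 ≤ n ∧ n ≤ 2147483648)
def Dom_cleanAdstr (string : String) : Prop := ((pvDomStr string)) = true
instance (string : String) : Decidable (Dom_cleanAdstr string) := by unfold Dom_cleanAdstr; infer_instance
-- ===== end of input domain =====

-- B replaces A's manual scan-and-branch index loop with three str.find calls and a
-- sentinel comparison (objective: simpler).

-- ===== PORT A =====
-- A scans the characters left to right: '*' breaks, '^' returns string[:n], '$' breaks.
-- (In the Python source `("*" or ".js" or "/")` evaluates to "*".)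
def cleanAdstrGo (rem : List Char) (n : Nat) (full : List Char) : Option String :=
  match rem with
  | [] => none
  | c :: rest =>
    if c = '*' then none
    else if c = '^' then some (String.ofList (full.take n))   -- string[:n]
    else if c = '$' then none
    else cleanAdstrGo rest (n + 1) full

def cleanAdstr (string : String) : Option String :=
  cleanAdstrGo string.toList 0 string.toList

-- ===== PORT B =====
def cleanAdstr_alt (string : String) : Option String :=
  let caret := PySem.Str.find string "^"
  if caret = -1 then none
  else
    let star := PySem.Str.find string "*"
    let dollar := PySem.Str.find string "$"
    let big : Int := PySem.Str.len string + 1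
    let star := if star = -1 then big else star
    let dollar := if dollar = -1 then big else dollar
    if caret < star ∧ caret < dollar then
      some (String.ofList (PySem.List.slice string.toList none (some caret)))  -- string[:caret]
    else none

-- ===== PRECONDITION & SPEC =====
def Spec_cleanAdstr (string : String) (out : Option String) : Prop := out = cleanAdstr_alt string
instance (string : String) (out : Option String) : Decidable (Spec_cleanAdstr string out) := by unfold Spec_cleanAdstr; infer_instance

-- ===== CLAIM (what is proved, stated in full; the proofs are below) =====
def Claim_equal_cleanAdstr : Prop := ∀ (string : String), Dom_cleanAdstr string → Spec_cleanAdstr string (cleanAdstr string)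

-- ===== LEMMAS AND PROOFS =====

-- A singleton list is a prefix iff it is the head.
theorem singleton_prefix_iff_head (c : Char) (l : List Char) : [c] <+: l ↔ l.head? = some c := by
  cases l with
  | nil => simp
  | cons a rest =>
    constructor
    · rintro ⟨t, ht⟩
      simp at ht
      simp [ht.1]
    · intro h
      simp at h
      exact ⟨rest, by simp [h]⟩

-- PySem's find of a single-character needle is List.findIdx? of that character.
theorem find_singleton (l : List Char) (c : Char) :
    PySem.Chars.find l [c] =
      (match l.findIdx? (fun x => x = c) with
       | none => (-1 : Int)
       | some j => (j : Int)) := by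
  cases h : l.findIdx? (fun x => x = c) with
  | none =>
    have hnm : c ∉ l := by
      intro hc
      have := (List.findIdx?_eq_none_iff.mp h) c hc
      simp at this
    have : ¬ [c] <:+: l := fun hi => hnm (List.singleton_sublist.mp hi.sublist)
    simpa using (PySem.Chars.find_eq_neg_one_iff l [c]).mpr this
  | some j =>
    obtain ⟨hj, hcj, hmin⟩ := List.findIdx?_eq_some_iff_getElem.mp h
    simp only [decide_eq_true_eq] at hcj
    have hpre : [c] <+: l.drop j := by
      rw [singleton_prefix_iff_head]
      rw [List.head?_drop]
      simp [List.getElem?_eq_getElem hj, hcj]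
    have hinf : [c] <:+: l := hpre.isInfix.trans (List.drop_suffix j l).isInfix
    have hge : 0 ≤ PySem.Chars.find l [c] := (PySem.Chars.find_nonneg_iff l [c]).mpr hinf
    obtain ⟨hp, hm⟩ := PySem.Chars.find_spec hge
    set t := (PySem.Chars.find l [c]).toNat with ht
    have htj : t = j := by
      rcases lt_trichotomy t j with hlt | heq | hgt
      · -- prefix at t contradicts minimality of j
        exfalso
        have := (singleton_prefix_iff_head c (l.drop t)).mp hp
        rw [List.head?_drop] at this
        have htl : t < l.length := lt_trans hlt hj
        simp [List.getElem?_eq_getElem htl] at this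
        exact hmin t hlt (by simp [this])
      · exact heq
      · exact absurd hpre (hm j hgt)
    have : PySem.Chars.find l [c] = (t : Int) := by omega
    rw [this, htj]

-- Characterisation of A's loop by the three first-occurrence indices.
theorem cleanAdstrGo_char (rem : List Char) (n : Nat) (full : List Char) :
    cleanAdstrGo rem n full =
      (match rem.findIdx? (fun x => x = '^') with
       | none => none
       | some j =>
         if (rem.findIdx? (fun x => x = '*')).all (fun i => j < i) ∧
            (rem.findIdx? (fun x => x = '$')).all (fun i => j < i) then
           some (String.ofList (full.take (n + j)))
         else none) := by
  induction rem generalizing n with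
  | nil => simp [cleanAdstrGo]
  | cons a rest ih =>
    by_cases hs : a = '*'
    · subst hs
      simp only [cleanAdstrGo, if_pos rfl]
      rw [List.findIdx?_cons]
      cases h : rest.findIdx? (fun x => x = '^') with
      | none => simp [List.findIdx?_cons, h]
      | some j => simp [List.findIdx?_cons, h]
    · by_cases hc : a = '^'
      · subst hc
        simp only [cleanAdstrGo]
        rw [List.findIdx?_cons, List.findIdx?_cons, List.findIdx?_cons]
        simp only [show (('^' : Char) = '*') = False by simp, show (('^' : Char) = '$') = False by simp]
        simp [Option.all_map]
      · by_cases hd : a = '$'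
        · subst hd
          have hval : cleanAdstrGo ('$' :: rest) n full = none := by
            simp [cleanAdstrGo]
          rw [hval, List.findIdx?_cons]
          cases h : rest.findIdx? (fun x => x = '^') with
          | none => simp
          | some j => simp [List.findIdx?_cons]
        · simp only [cleanAdstrGo, if_neg hs, if_neg hc, if_neg hd]
          rw [ih (n + 1)]
          simp only [List.findIdx?_cons, decide_eq_true_eq, if_neg hs, if_neg hc, if_neg hd]
          cases h : rest.findIdx? (fun x => x = '^') with
          | none => simp
          | some j =>
            simp only [Option.map_some]
            have harith : n + 1 + j = n + (j + 1) := by omega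
            cases h2 : rest.findIdx? (fun x => x = '*') <;>
              cases h3 : rest.findIdx? (fun x => x = '$') <;>
                simp [Option.all_map, harith, Nat.add_lt_add_iff_right]

-- findIdx? returns an index within the list.
theorem findIdx?_lt_length {α : Type} (p : α → Bool) (l : List α) (j : Nat)
    (h : l.findIdx? p = some j) : j < l.length :=
  (List.findIdx?_eq_some_iff_getElem.mp h).1

theorem cleanAdstr_eq (string : String) : cleanAdstr string = cleanAdstr_alt string := by
  unfold cleanAdstr cleanAdstr_alt
  simp only [PySem.Str.find_eq, PySem.Str.len]
  rw [cleanAdstrGo_char]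
  simp only [show ("^" : String).toList = ['^'] by decide,
             show ("*" : String).toList = ['*'] by decide,
             show ("$" : String).toList = ['$'] by decide]
  rw [find_singleton, find_singleton, find_singleton]
  cases h1 : string.toList.findIdx? (fun x => x = '^') with
  | none => simp
  | some j =>
    have hj := findIdx?_lt_length _ _ _ h1
    have hslice : PySem.List.slice string.toList none (some (j : Int)) = string.toList.take j :=
      PySem.List.slice_to_natCast string.toList j
    cases h2 : string.toList.findIdx? (fun x => x = '*') with
    | none =>
      cases h3 : string.toList.findIdx? (fun x => x = '$') with
      | none =>
        simp only [Option.all_none, if_neg (by omega : ¬ (j : Int) = -1), if_true]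
        rw [if_pos ⟨trivial, trivial⟩,
            if_pos ⟨by exact_mod_cast Nat.lt_succ_of_lt hj, by exact_mod_cast Nat.lt_succ_of_lt hj⟩]
        simp [hslice]
      | some d =>
        have hd := findIdx?_lt_length _ _ _ h3
        simp only [Option.all_none, Option.all_some, if_neg (by omega : ¬ (j : Int) = -1),
          if_neg (by omega : ¬ (d : Int) = -1), if_true]
        by_cases hjd : j < d
        · rw [if_pos (by simpa using hjd),
              if_pos ⟨by exact_mod_cast Nat.lt_succ_of_lt hj, by exact_mod_cast hjd⟩]
          simp [hslice]
        · rw [if_neg (by simpa using hjd), if_neg (by rintro ⟨-, h⟩; omega)]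
    | some s =>
      have hs := findIdx?_lt_length _ _ _ h2
      cases h3 : string.toList.findIdx? (fun x => x = '$') with
      | none =>
        simp only [Option.all_none, Option.all_some, if_neg (by omega : ¬ (j : Int) = -1),
          if_neg (by omega : ¬ (s : Int) = -1), if_true]
        by_cases hjs : j < s
        · rw [if_pos (by simpa using hjs),
              if_pos ⟨by exact_mod_cast hjs, by exact_mod_cast Nat.lt_succ_of_lt hj⟩]
          simp [hslice]
        · rw [if_neg (by simpa using hjs), if_neg (by rintro ⟨h, -⟩; omega)]
      | some d =>
        have hd := findIdx?_lt_length _ _ _ h3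
        simp only [Option.all_some, if_neg (by omega : ¬ (j : Int) = -1),
          if_neg (by omega : ¬ (s : Int) = -1), if_neg (by omega : ¬ (d : Int) = -1)]
        by_cases hb : j < s ∧ j < d
        · rw [if_pos (by simpa using hb), if_pos (by exact ⟨by exact_mod_cast hb.1, by exact_mod_cast hb.2⟩)]
          simp [hslice]
        · rw [if_neg (by simpa using hb),
              if_neg (by rintro ⟨ha, hc⟩; exact hb ⟨by exact_mod_cast ha, by exact_mod_cast hc⟩)]

-- ===== VERDICT (by name: the statement is the Claim_ definition above) =====
theorem cleanAdstr_spec : Claim_equal_cleanAdstr := by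
  intro string _
  exact cleanAdstr_eq string
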